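-- pv_equiv track=rewrite | github.com/JangHwanBae132/CodingTest | solution/210826/기능개발.py | solution
-- ===== SOURCE A (Python) =====
-- from collections import deque
--
-- def solution(progresses, speeds):
--     answer = []
--     s= 0
--     cnt =1
--     temp =0
--     queue = deque(progresses)
--
--     while(queue):
--         if queue[0]+cnt*speeds[s] >= 100:
--             s += 1
--             queue.popleft()
--             temp +=1
--         elif temp != 0:
--             cnt += 1
--             answer.append(temp)
--             temp = 0
--         else:
--             cnt += 1
--             temp = 0
--     answer.append(temp)
--     return answer
-- ===== SOURCE B (Python) =====
-- def solution(progresses, speeds):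
--     # one release day per task, then a single grouping pass
--     days = [max(1, -(-(100 - p) // v)) for p, v in zip(progresses, speeds)]
--     answer = []
--     group_day = 0
--     count = 0
--     for d in days:
--         if count == 0:
--             group_day = d
--             count = 1
--         elif d <= group_day:
--             count += 1
--         else:
--             answer.append(count)
--             group_day = d
--             count = 1
--     answer.append(count)
--     return answer
-- ===== Notes on version B (the rewrite author's own statement) =====
-- stated objective: simpler
-- what changed: Replaces A's day-by-day deque simulation (incrementing a day counter until the front task is done) with a direct computation of each task's release day via ceiling division followed by a single grouping pass.
-- outside the precondition, e.g. on solution([100], [0]): A returns [1], B raises ZeroDivisionError; on solution([150], [-5]): A returns [1], B returns [1]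
import Mathlib
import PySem

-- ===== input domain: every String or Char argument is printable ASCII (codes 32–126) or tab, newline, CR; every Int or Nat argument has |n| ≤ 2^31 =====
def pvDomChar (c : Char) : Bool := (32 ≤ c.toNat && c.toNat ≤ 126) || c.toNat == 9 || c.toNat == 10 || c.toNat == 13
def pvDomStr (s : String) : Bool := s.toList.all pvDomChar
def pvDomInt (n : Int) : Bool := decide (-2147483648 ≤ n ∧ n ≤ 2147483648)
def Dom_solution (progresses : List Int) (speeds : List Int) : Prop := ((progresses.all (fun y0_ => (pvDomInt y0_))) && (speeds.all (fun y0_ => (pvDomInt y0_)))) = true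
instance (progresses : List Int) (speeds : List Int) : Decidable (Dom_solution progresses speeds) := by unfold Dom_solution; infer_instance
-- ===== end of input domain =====

-- B replaces A's day-by-day deque simulation by per-task release days (ceiling division)
-- plus one grouping pass; objective: simpler. Equality of RETURN values is what is proved.

-- ===== PORT A =====
-- A's while-loop over (queue, s, cnt, temp, answer); fuel only makes the loop total
-- (whenever every speed is ≥ 1 the day counter is bounded, so this fuel always suffices).
def solutionLoopA (speeds : List Int) : Nat → List Int → Int → Int → Int → List Int → List Int × Int
  | 0, _, _, _, temp, answer => (answer, temp)
  | fuel+1, queue, s, cnt, temp, answer =>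
    match queue with
    | [] => (answer, temp)
    | q0 :: rest =>
      match PySem.List.pyGet? speeds s with
      | none => (answer, temp)   -- speeds[s] raises IndexError in Python; outside Pre_
      | some v =>
        if 100 ≤ q0 + cnt * v then
          solutionLoopA speeds fuel rest (s+1) cnt (temp+1) answer
        else if temp ≠ 0 then
          solutionLoopA speeds fuel (q0 :: rest) s (cnt+1) 0 (answer ++ [temp])
        else
          solutionLoopA speeds fuel (q0 :: rest) s (cnt+1) 0 answer

def solution (progresses : List Int) (speeds : List Int) : List Int :=
  let r := solutionLoopA speeds
    (progresses.length + 101 + (progresses.map (fun p => (100 - p).toNat)).sum)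
    progresses 0 1 0 []
  r.1 ++ [r.2]

-- ===== PORT B =====
-- release day of one task: max(1, -(-(100 - p) // v))
def releaseDay (pv : Int × Int) : Int :=
  max 1 (-(PySem.Int.floordiv (-(100 - pv.1)) pv.2))

-- one step of B's grouping loop over state (answer, group_day, count)
def groupStep (st : List Int × Int × Int) (d : Int) : List Int × Int × Int :=
  if st.2.2 = 0 then (st.1, d, 1)
  else if d ≤ st.2.1 then (st.1, st.2.1, st.2.2 + 1)
  else (st.1 ++ [st.2.2], d, 1)

def solution_alt (progresses : List Int) (speeds : List Int) : List Int :=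
  let days := (progresses.zip speeds).map releaseDay
  let st := days.foldl groupStep ([], 0, 0)
  st.1 ++ [st.2.2]

-- ===== PRECONDITION & SPEC =====
-- Pre_ is the problem's natural domain: a speed ≥ 1 for every task. Outside it Python A
-- raises IndexError (speeds shorter than progresses), loops forever (non-positive speed on
-- an unfinished task), or — where A still returns (tasks already at ≥ 100 progress with a
-- speed ≤ 0) — B's ceiling division raises ZeroDivisionError or floors the wrong way.
def Pre_solution (progresses : List Int) (speeds : List Int) : Prop :=
  progresses.length ≤ speeds.length ∧
  ∀ pv ∈ progresses.zip speeds, 1 ≤ pv.2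

instance (progresses : List Int) (speeds : List Int) : Decidable (Pre_solution progresses speeds) := by
  unfold Pre_solution; infer_instance

def pvWitness_solution : List Int × List Int := ([93, 30, 55], [1, 30, 5])

def Spec_solution (progresses : List Int) (speeds : List Int) (out : List Int) : Prop := out = solution_alt progresses speeds
instance (progresses : List Int) (speeds : List Int) (out : List Int) : Decidable (Spec_solution progresses speeds out) := by unfold Spec_solution; infer_instance

-- ===== CLAIM (what is proved, stated in full; the proofs are below) =====
def Claim_equal_solution : Prop := ∀ (progresses : List Int) (speeds : List Int), Dom_solution progresses speeds → Pre_solution progresses speeds → Spec_solution progresses speeds (solution progresses speeds)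

-- ===== LEMMAS AND PROOFS =====

-- characterisation of the release day: it is ≥ 1, at most 1 + max(0, 100 - p),
-- and for any day c ≥ 1 the task is done on day c iff releaseDay ≤ c
lemma releaseDay_spec (p v : Int) (hv : 1 ≤ v) :
    (1 ≤ releaseDay (p, v) ∧ releaseDay (p, v) ≤ 1 + ((100 - p).toNat : Int)) ∧
    ∀ c : Int, 1 ≤ c → (100 ≤ p + c * v ↔ releaseDay (p, v) ≤ c) := by
  have hv0 : (0:Int) < v := by omega
  have hbr : ((-PySem.Int.floordiv (-(100 - p)) v) - 1) * v < 100 - p ∧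
      (100 - p) ≤ (-PySem.Int.floordiv (-(100 - p)) v) * v :=
    (PySem.Int.neg_floordiv_neg_eq_iff_of_pos hv0).mp rfl
  set q : Int := -PySem.Int.floordiv (-(100 - p)) v with hqdef
  have hrd : releaseDay (p, v) = max 1 q := rfl
  constructor
  · constructor
    · rw [hrd]; exact le_max_left 1 q
    · rw [hrd]
      rcases le_or_gt q 1 with h | h
      · have : max 1 q = 1 := max_eq_left h
        omega
      · have : max 1 q = q := max_eq_right (by omega)
        rw [this]
        have h1 : q - 1 ≤ (q - 1) * v := by nlinarith
        omega
  · intro c hc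
    constructor
    · intro h
      rw [hrd]
      have hqc : q ≤ c := by nlinarith [hbr.1]
      omega
    · intro h
      rw [hrd] at h
      have hqc : q ≤ c := by omega
      nlinarith [hbr.2]

-- a count-0 state ignores the stored group day
lemma foldl_groupStep_zero (ds : List Int) (answer : List Int) (g g' : Int) :
    ((ds.foldl groupStep (answer, g, 0)).1, (ds.foldl groupStep (answer, g, 0)).2.2) =
    ((ds.foldl groupStep (answer, g', 0)).1, (ds.foldl groupStep (answer, g', 0)).2.2) := by
  cases ds with
  | nil => rfl
  | cons d ds => simp [groupStep, List.foldl_cons]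

-- main invariant: A's loop from index k equals B's grouping fold over the remaining days
lemma loopA_eq (P S : List Int) (hlen : P.length ≤ S.length)
    (hgood : ∀ pv ∈ P.zip S, 1 ≤ pv.2) :
    ∀ (fuel k : Nat) (cnt temp : Int) (answer : List Int),
      k ≤ P.length →
      1 ≤ cnt → cnt ≤ 100 + (((P.map (fun p => (100 - p).toNat)).sum : Nat) : Int) →
      0 ≤ temp →
      (temp = 0 → ∀ d0, ((((P.zip S).map releaseDay).drop k).head? = some d0) → cnt ≤ d0) →
      P.length - k + ((101 + (((P.map (fun p => (100 - p).toNat)).sum : Nat) : Int)) - cnt).toNat ≤ fuel →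
      solutionLoopA S fuel (P.drop k) (k : Int) cnt temp answer =
        (((((P.zip S).map releaseDay).drop k).foldl groupStep (answer, cnt, temp)).1,
         ((((P.zip S).map releaseDay).drop k).foldl groupStep (answer, cnt, temp)).2.2) := by
  intro fuel
  induction fuel with
  | zero =>
    intro k cnt temp answer hk h1 h100 htemp hinv hfuel
    omega
  | succ fuel ih =>
    intro k cnt temp answer hk h1 h100 htemp hinv hfuel
    by_cases hkn : k < P.length
    · have hkS : k < S.length := lt_of_lt_of_le hkn hlen
      have hdropP : P.drop k = P[k] :: P.drop (k+1) := List.drop_eq_getElem_cons hkn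
      have hkz : k < (P.zip S).length := by rw [List.length_zip]; omega
      have hzk : (P.zip S)[k] = (P[k], S[k]) := by simp
      have hmem : (P[k], S[k]) ∈ P.zip S := hzk ▸ (P.zip S).getElem_mem hkz
      have hv : 1 ≤ S[k] := hgood _ hmem
      have hspec := releaseDay_spec P[k] S[k] hv
      have hel : (100 - P[k]).toNat ≤ (P.map (fun p => (100 - p).toNat)).sum :=
        List.single_le_sum (fun a _ => Nat.zero_le a) _
          (List.mem_map_of_mem (P.getElem_mem hkn))
      have hd0le : releaseDay (P[k], S[k]) ≤
          100 + (((P.map (fun p => (100 - p).toNat)).sum : Nat) : Int) := by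
        have := hspec.1.2
        omega
      have hkd : k < ((P.zip S).map releaseDay).length := by
        rw [List.length_map]; exact hkz
      have hdropD : ((P.zip S).map releaseDay).drop k
          = releaseDay (P[k], S[k]) :: ((P.zip S).map releaseDay).drop (k+1) := by
        rw [List.drop_eq_getElem_cons hkd]
        simp [hzk]
      have hget : PySem.List.pyGet? S (k : Int) = some S[k] := by
        rw [PySem.List.pyGet?_natCast]
        exact List.getElem?_eq_getElem hkS
      have hcast : ((k : Int) + 1) = (((k+1 : Nat)) : Int) := by push_cast; ring
      rw [hdropP]
      simp only [solutionLoopA, hget]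
      by_cases hready : 100 ≤ P[k] + cnt * S[k]
      · have hd0c : releaseDay (P[k], S[k]) ≤ cnt := (hspec.2 cnt h1).mp hready
        rw [if_pos hready, hcast]
        by_cases htz : temp = 0
        · have hcd : cnt ≤ releaseDay (P[k], S[k]) := by
            refine hinv htz _ ?_
            rw [hdropD]; rfl
          have heq : releaseDay (P[k], S[k]) = cnt := le_antisymm hd0c hcd
          subst htz
          simp only [zero_add]
          rw [ih (k+1) cnt 1 answer (by omega) h1 h100 (by omega)
              (by intro h; omega) (by omega)]
          rw [hdropD, List.foldl_cons]
          simp [groupStep, heq]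
        · rw [ih (k+1) cnt (temp+1) answer (by omega) h1 h100 (by omega)
              (by intro h; omega) (by omega)]
          rw [hdropD, List.foldl_cons]
          simp [groupStep, htz, hd0c]
      · have hcd0 : cnt < releaseDay (P[k], S[k]) := by
          by_contra h
          push Not at h
          exact hready ((hspec.2 cnt h1).mpr h)
        rw [if_neg hready]
        by_cases htz : temp = 0
        · rw [if_neg (by simpa using htz)]
          rw [← hdropP]
          rw [ih k (cnt+1) 0 answer hk (by omega) (by omega) le_rfl
              (by intro _ d0 hd0; rw [hdropD] at hd0; injection hd0 with hd0; omega)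
              (by omega)]
          subst htz
          rw [hdropD, List.foldl_cons, List.foldl_cons]
          simp [groupStep]
        · rw [if_pos (by simpa using htz)]
          rw [← hdropP]
          rw [ih k (cnt+1) 0 (answer ++ [temp]) hk (by omega) (by omega) le_rfl
              (by intro _ d0 hd0; rw [hdropD] at hd0; injection hd0 with hd0; omega)
              (by omega)]
          rw [hdropD, List.foldl_cons, List.foldl_cons]
          simp [groupStep, htz, not_le.mpr hcd0]
    · have hke : k = P.length := by omega
      have hdP : P.drop k = [] := by
        apply List.drop_eq_nil_of_le; omega
      have hdD : ((P.zip S).map releaseDay).drop k = [] := by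
        apply List.drop_eq_nil_of_le
        rw [List.length_map, List.length_zip]; omega
      rw [hdP, hdD]
      simp [solutionLoopA]

-- ===== VERDICT (by name: the statement is the Claim_ definition above) =====
theorem solution_spec : Claim_equal_solution := by
  unfold Claim_equal_solution
  intro P S _ hpre
  obtain ⟨hlen, hgood⟩ := hpre
  unfold Spec_solution solution solution_alt
  have hinv0 : (0 : Int) = 0 → ∀ d0,
      ((((P.zip S).map releaseDay).drop 0).head? = some d0) → (1 : Int) ≤ d0 := by
    intro _ d0 hd0
    rw [List.drop_zero] at hd0
    have hd0m : d0 ∈ (P.zip S).map releaseDay := List.mem_of_mem_head? hd0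
    obtain ⟨pv, hpv, hrd⟩ := List.mem_map.mp hd0m
    have hv : 1 ≤ pv.2 := hgood pv hpv
    have := (releaseDay_spec pv.1 pv.2 hv).1.1
    rw [← hrd]
    simpa using this
  have h := loopA_eq P S hlen hgood
    (P.length + 101 + (P.map (fun p => (100 - p).toNat)).sum) 0 1 0 []
    (by omega) le_rfl (by omega) le_rfl hinv0 (by omega)
  rw [List.drop_zero] at h
  simp only [Nat.cast_zero] at h
  simp only [h, List.drop_zero]
  have hz := foldl_groupStep_zero ((P.zip S).map releaseDay) [] 1 0
  have h1 := congrArg Prod.fst hz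
  have h2 := congrArg Prod.snd hz
  simp only at h1 h2
  rw [h1, h2]
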